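-- pv_equiv track=rewrite | github.com/ZongyuWu97/LeetCode | OA/weride_oa/covert_them_all.py | coverThemAll
-- ===== SOURCE A (Python) =====
-- def coverThemAll(distance, cost):
--     # Check if there's a distance of 1, if so, that's the minimum cost we can have
--    # Initialize minimum cost to a large number
--     if 1 in distance:
--         min_cost = cost[distance.index(1)]
--     else:
--         min_cost = float('inf')
--
--     # Import the gcd function from math module
--     from math import gcd
--     from functools import reduce
--
--     # Function to find gcd of a list of numbers
--     def find_gcd(list):
--         x = reduce(gcd, list)
--         return x
--
--     # Initialize the minimum cost to the sum of all costs as the worst case scenario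
--     min_cost = sum(cost)
--
--     # Using bitmask to generate all possible combinations of distances
--     n = len(distance)
--     for i in range(1, 1 << n):
--         selected_distances = [distance[j] for j in range(n) if (i & (1 << j))]
--         # If the GCD of the selected distances is 1, they can cover all integers
--         if find_gcd(selected_distances) == 1:
--             current_cost = sum(cost[j] for j in range(n) if (i & (1 << j)))
--             min_cost = min(min_cost, current_cost)
--
--     # If we found a combination that can cover all integers, return the cost, otherwise -1
--     return min_cost if min_cost != sum(cost) else -1
-- ===== SOURCE B (Python) =====
-- from math import gcd
--
--
-- def coverThemAll(distance, cost):
--     # DP over achievable "reduced gcd" states: dp maps the value of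
--     # reduce(gcd, subset) of a non-empty chosen subset of the items seen so
--     # far to the minimum cost achieving it; one pass over the items.
--     dp = {}
--     for d, c in zip(distance, cost):
--         new = dict(dp)
--         for g, v in dp.items():
--             k = gcd(g, d)
--             w = v + c
--             if k not in new or w < new[k]:
--                 new[k] = w
--         if d not in new or c < new[d]:
--             new[d] = c
--         dp = new
--     total = sum(cost)
--     best = min(total, dp[1]) if 1 in dp else total
--     return best if best != total else -1
-- ===== Notes on version B (the rewrite author's own statement) =====
-- stated objective: faster
-- what changed: Replaced the O(2^n * n) bitmask enumeration of all subsets with a one-pass dynamic program over a dictionary mapping each achievable reduce(gcd, subset) value to the minimum cost achieving it, keeping A's final sentinel convention (return -1 when the best achievable value is not below sum(cost)).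
import Mathlib
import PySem

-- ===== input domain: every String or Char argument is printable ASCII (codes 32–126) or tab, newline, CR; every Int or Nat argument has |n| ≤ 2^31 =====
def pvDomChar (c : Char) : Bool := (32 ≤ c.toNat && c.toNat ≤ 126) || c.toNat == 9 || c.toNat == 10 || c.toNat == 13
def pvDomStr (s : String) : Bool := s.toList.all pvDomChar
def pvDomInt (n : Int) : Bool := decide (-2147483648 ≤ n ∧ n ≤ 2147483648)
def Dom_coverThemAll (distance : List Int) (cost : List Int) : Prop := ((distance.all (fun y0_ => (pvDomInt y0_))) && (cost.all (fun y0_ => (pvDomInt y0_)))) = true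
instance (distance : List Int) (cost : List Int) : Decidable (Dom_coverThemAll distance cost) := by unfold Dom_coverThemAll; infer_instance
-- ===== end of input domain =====

-- B replaces A's O(2^n·n) bitmask subset enumeration by a one-pass DP over a dict of
-- achievable reduce(gcd,·) states, keeping A's final "best if best != sum(cost) else -1"
-- return convention (objective: faster).


-- ===== PORT A =====
-- find_gcd = reduce(gcd, l): the head, then math.gcd folded left over the tail
-- (the [] case is junk: the loop's masks start at 1, but mask 0 is given gcd 0 ≠ 1 so it can be folded in)
def pyReduceGcd (l : List Int) : Int :=
  match l with
  | [] => 0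
  | h :: t => t.foldl (fun a b => ((Int.gcd a b : Nat) : Int)) h

def coverThemAll (distance : List Int) (cost : List Int) : Int :=
  -- Python's initial "if 1 in distance: min_cost = cost[distance.index(1)] else: min_cost = float('inf')"
  -- is dead code: min_cost is unconditionally overwritten below before any read
  -- (and inside Pre_ the cost[...] lookup there cannot raise).
  let n := distance.length
  let min_cost : Int := cost.sum                                     -- min_cost = sum(cost)
  let final :=
    (PySem.List.pyRange 1 ((2 : Int) ^ n)).foldl (fun mc i =>        -- for i in range(1, 1 << n)
      -- selected_distances = [distance[j] for j in range(n) if (i & (1 << j))]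
      -- (j < n = len(distance), so the pyGetD default is never read)
      let selected := (List.range n).filterMap (fun (j : Nat) =>
        if PySem.Int.band i ((1 : Int) <<< j) ≠ 0 then some (PySem.List.pyGetD distance (j : Int) 0) else none)
      if pyReduceGcd selected = 1 then
        -- current_cost = sum(cost[j] for j in range(n) if (i & (1 << j)))
        -- (inside Pre_ this branch is only reached with n ≤ len(cost), so j is in range)
        let current := (List.range n).foldl (fun (s : Int) (j : Nat) =>
          if PySem.Int.band i ((1 : Int) <<< j) ≠ 0 then s + PySem.List.pyGetD cost (j : Int) 0 else s) 0
        min mc current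
      else mc) min_cost
  if final ≠ cost.sum then final else -1

-- ===== PORT B =====
def altGcd (a b : Int) : Int := ((Int.gcd a b : Nat) : Int)          -- math.gcd

-- "if k not in new or w < new[k]: new[k] = w"
def altRelax (nw : PySem.Dict Int Int) (key val : Int) : PySem.Dict Int Int :=
  match nw.get? key with
  | none => nw.insert key val
  | some cur => if val < cur then nw.insert key val else nw

def altStep (dp : PySem.Dict Int Int) (dc : Int × Int) : PySem.Dict Int Int :=
  let nw := dp.items.foldl (fun nw gv => altRelax nw (altGcd gv.1 dc.1) (gv.2 + dc.2)) dp
  altRelax nw dc.1 dc.2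

def coverThemAll_alt (distance : List Int) (cost : List Int) : Int :=
  let dp := (distance.zip cost).foldl altStep PySem.Dict.empty
  let total := cost.sum
  let best := match dp.get? 1 with                                   -- min(total, dp[1]) if 1 in dp else total
    | some v => min total v
    | none => total
  if best ≠ total then best else -1

-- ===== PRECONDITION & SPEC =====
-- spec-side helper (used by Pre_; gcd is Mathlib's normalized gcd on ℤ, = math.gcd)
def listGcd (l : List Int) : Int := l.foldr gcd 0

-- A raises IndexError exactly when cost is shorter than distance while some subset of the
-- distances has reduce-gcd 1 (then a qualifying bitmask reads cost out of range; a distance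
-- equal to 1 already makes the initial cost[distance.index(1)] lookup raise). Pre_ admits
-- every input on which A returns: the second disjunct is the closed form of
-- "no subset of distance has reduce-gcd 1".
def Pre_coverThemAll (distance : List Int) (cost : List Int) : Prop :=
  distance.length ≤ cost.length ∨
    ¬ (listGcd distance = 1 ∧ (2 ≤ distance.length ∨ distance = [1]))
instance (distance : List Int) (cost : List Int) : Decidable (Pre_coverThemAll distance cost) := by
  unfold Pre_coverThemAll; infer_instance
def pvWitness_coverThemAll : List Int × List Int := ([2, 3], [1, 5])

def Spec_coverThemAll (distance : List Int) (cost : List Int) (out : Int) : Prop :=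
  out = coverThemAll_alt distance cost
instance (distance : List Int) (cost : List Int) (out : Int) : Decidable (Spec_coverThemAll distance cost out) := by
  unfold Spec_coverThemAll; infer_instance

-- ===== CLAIM (what is proved, stated in full; the proofs are below) =====
def Claim_equal_coverThemAll : Prop := ∀ (distance : List Int) (cost : List Int), Dom_coverThemAll distance cost → Pre_coverThemAll distance cost → Spec_coverThemAll distance cost (coverThemAll distance cost)

-- ===== LEMMAS AND PROOFS =====

-- proof-side names: specGcd is reduce(gcd, l) computed by a RIGHT fold (equal to the
-- ports' left folds by gcd associativity)
def specGcd : List Int → Int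
  | [] => 0
  | [a] => a
  | a :: rest => gcd a (specGcd rest)
def igcd (a b : Int) : Int := gcd a b
def specCost (s : List (Int × Int)) : Int := (s.map Prod.snd).sum
-- the costs of all non-empty subsets of the (distance, cost) pairs whose reduce(gcd,·) is 1
def qualCosts (l : List (Int × Int)) : List Int :=
  l.sublists.filterMap fun s => if specGcd (s.map Prod.fst) = 1 then some (specCost s) else none

-- ---------- small gcd facts ----------
theorem igcd_eq_gcd (a b : Int) : igcd a b = ((Int.gcd a b : Nat) : Int) :=
  (Int.coe_gcd a b).symm

theorem dvd_igcd {d a b : Int} (ha : d ∣ a) (hb : d ∣ b) : d ∣ igcd a b :=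
  dvd_gcd ha hb

theorem listGcd_nonneg (l : List Int) : 0 ≤ listGcd l := by
  cases l with
  | nil => simp [listGcd]
  | cons a t =>
    show 0 ≤ igcd a (listGcd t)
    rw [igcd_eq_gcd]
    positivity

theorem listGcd_cons (a : Int) (t : List Int) : listGcd (a :: t) = igcd a (listGcd t) := rfl

theorem igcd_dvd_left (a b : Int) : igcd a b ∣ a := gcd_dvd_left a b

theorem igcd_dvd_right (a b : Int) : igcd a b ∣ b := gcd_dvd_right a b

theorem listGcd_dvd_mem {l : List Int} {x : Int} (hx : x ∈ l) : listGcd l ∣ x := by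
  induction l with
  | nil => cases hx
  | cons a t ih =>
    rw [listGcd_cons]
    rcases List.mem_cons.mp hx with rfl | hx'
    · exact igcd_dvd_left _ _
    · exact dvd_trans (igcd_dvd_right _ _) (ih hx')

theorem igcd_assoc (a b c : Int) : igcd (igcd a b) c = igcd a (igcd b c) :=
  gcd_assoc a b c

theorem dvd_specGcd {d : Int} {l : List Int} (hl : l ≠ []) (h : ∀ x ∈ l, d ∣ x) :
    d ∣ specGcd l := by
  induction l with
  | nil => exact absurd rfl hl
  | cons a t ih =>
    cases t with
    | nil => exact h a (by simp)
    | cons b t' =>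
      exact dvd_igcd (h a (by simp)) (ih (by simp) (fun x hx => h x (by simp [hx])))

-- any non-empty sublist of distance with reduce-gcd 1 forces the closed form in Pre_
theorem qual_imp {distance : List Int} {s : List Int}
    (hs : s ∈ distance.sublists) (hne : s ≠ []) (h1 : specGcd s = 1) :
    listGcd distance = 1 ∧ (2 ≤ distance.length ∨ distance = [1]) := by
  have hsub := List.mem_sublists.mp hs
  have hdvd : listGcd distance ∣ specGcd s :=
    dvd_specGcd hne (fun x hx => listGcd_dvd_mem (hsub.mem hx))
  rw [h1] at hdvd
  have hG : listGcd distance = 1 := Int.eq_one_of_dvd_one (listGcd_nonneg _) hdvd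
  refine ⟨hG, ?_⟩
  match distance, hsub with
  | [], hsub =>
    exact absurd (List.sublist_nil.mp hsub) hne
  | [d], hsub =>
    rcases List.sublist_singleton.mp hsub with rfl | rfl
    · exact absurd rfl hne
    · right
      have : specGcd [d] = d := rfl
      rw [this] at h1
      rw [h1]
  | d₁ :: d₂ :: t, _ =>
    left; simp

-- ---------- bitmask selection ↔ sublists ----------
def bitsSelect : List α → Nat → List α
  | [], _ => []
  | x :: xs, m => if m.testBit 0 then x :: bitsSelect xs (m / 2) else bitsSelect xs (m / 2)

theorem band_test (m j : Nat) :
    (PySem.Int.band (m : Int) ((1 : Int) <<< j) ≠ 0) ↔ m.testBit j = true := by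
  have h1 : (1 : Int) <<< j = ((2 ^ j : Nat) : Int) := by
    rw [Int.shiftLeft_eq]; push_cast; ring
  rw [h1, PySem.Int.band_natCast, Nat.and_two_pow]
  cases h : m.testBit j <;> simp [h]

theorem fm_bits (l : List Int) (m : Nat) :
    (List.range l.length).filterMap
      (fun j => if m.testBit j then some (l.getD j 0) else none) = bitsSelect l m := by
  induction l generalizing m with
  | nil => simp [bitsSelect]
  | cons x xs ih =>
    rw [List.length_cons, List.range_succ_eq_map, List.filterMap_cons, List.filterMap_map]
    have h2 : ((fun j => if m.testBit j then some ((x :: xs).getD j 0) else none) ∘ Nat.succ)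
        = (fun j => if (m / 2).testBit j then some (xs.getD j 0) else none) := by
      funext j
      simp [Function.comp, Nat.testBit_add_one]
    rw [h2, ih]
    by_cases h0 : m.testBit 0 <;> simp [bitsSelect, h0]

theorem bitsSelect_map {α β : Type} (f : α → β) (l : List α) (m : Nat) :
    bitsSelect (l.map f) m = (bitsSelect l m).map f := by
  induction l generalizing m with
  | nil => simp [bitsSelect]
  | cons x xs ih =>
    by_cases h0 : m.testBit 0 <;> simp [bitsSelect, h0, ih]

theorem range_double (M : Nat) :
    List.range (2 * M) = (List.range M).flatMap (fun q => [2 * q, 2 * q + 1]) := by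
  induction M with
  | zero => rfl
  | succ M ih =>
    have h : 2 * (M + 1) = (2 * M + 1) + 1 := by ring
    rw [h, List.range_succ, List.range_succ, List.range_succ, ih, List.flatMap_append]
    simp

theorem map_bits_range {α : Type} (l : List α) :
    (List.range (2 ^ l.length)).map (bitsSelect l) = l.sublists := by
  induction l with
  | nil => simp [bitsSelect]
  | cons x xs ih =>
    have hlen : (2 : Nat) ^ (x :: xs).length = 2 * 2 ^ xs.length := by
      rw [List.length_cons, pow_succ]; ring
    rw [hlen, range_double, List.map_flatMap]
    have h3 : (fun q => ([2 * q, 2 * q + 1].map (bitsSelect (x :: xs))))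
        = (fun q => [bitsSelect xs q, x :: bitsSelect xs q]) := by
      funext q
      have e0 : bitsSelect (x :: xs) (2 * q) = bitsSelect xs q := by
        have hb : (2 * q).testBit 0 = false := by simp [Nat.testBit_zero]
        have hd : 2 * q / 2 = q := by omega
        simp [bitsSelect, hb, hd]
      have e1 : bitsSelect (x :: xs) (2 * q + 1) = x :: bitsSelect xs q := by
        have hb : (2 * q + 1).testBit 0 = true := by simp [Nat.testBit_zero]
        have hd : (2 * q + 1) / 2 = q := by omega
        simp [bitsSelect, hb, hd]
      simp [e0, e1]
    rw [h3]
    have h4 : (List.range (2 ^ xs.length)).flatMap (fun q => [bitsSelect xs q, x :: bitsSelect xs q])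
        = ((List.range (2 ^ xs.length)).map (bitsSelect xs)).flatMap (fun s => [s, x :: s]) := by
      rw [List.flatMap_map]
    rw [h4, ih]
    exact (List.sublists_cons x xs).symm

theorem bitsSelect_mem_sublists {α : Type} (l : List α) {m : Nat} (hm : m < 2 ^ l.length) :
    bitsSelect l m ∈ l.sublists := by
  rw [← map_bits_range]
  exact List.mem_map_of_mem (List.mem_range.mpr hm)

-- ---------- generic fold shapes ----------
theorem foldl_ifmin {β : Type} (L : List β) (P : β → Prop) [DecidablePred P]
    (f : β → Int) (a : Int) :
    L.foldl (fun mc s => if P s then min mc (f s) else mc) a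
      = (L.filterMap fun s => if P s then some (f s) else none).foldl min a := by
  induction L generalizing a with
  | nil => simp
  | cons s L ih => by_cases h : P s <;> simp [h, ih]

theorem foldl_addif {β : Type} (L : List β) (P : β → Prop) [DecidablePred P]
    (f : β → Int) (a : Int) :
    L.foldl (fun s j => if P j then s + f j else s) a
      = a + (L.filterMap fun j => if P j then some (f j) else none).sum := by
  induction L generalizing a with
  | nil => simp
  | cons j L ih =>
    by_cases h : P j <;> simp [h, ih] <;> ring

theorem fm_absorb {S : List Int} {a : Int} (h : ∀ w ∈ S, a ≤ w) : S.foldl min a = a := by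
  induction S with
  | nil => rfl
  | cons w S ih =>
    rw [List.foldl_cons, min_eq_left (h w (by simp))]
    exact ih (fun x hx => h x (by simp [hx]))

theorem fm_eq {S : List Int} {v : Int} (T : Int) (hv : v ∈ S) (hlb : ∀ w ∈ S, v ≤ w) :
    S.foldl min T = min T v := by
  induction S generalizing T with
  | nil => cases hv
  | cons w S ih =>
    rw [List.foldl_cons]
    by_cases hv' : v ∈ S
    · rw [ih (min T w) hv' (fun x hx => hlb x (by simp [hx])), min_assoc,
        min_eq_right (hlb w (by simp))]
    · rcases List.mem_cons.mp hv with rfl | h'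
      · have habs : ∀ x ∈ S, min T v ≤ x :=
          fun x hx => le_trans (min_le_right _ _) (hlb x (by simp [hx]))
        rw [fm_absorb habs]
      · exact absurd h' hv'

-- ---------- characterisation of port A ----------
def costSumBits (cost : List Int) (n m : Nat) : Int :=
  ((List.range n).filterMap fun j => if m.testBit j then some (cost.getD j 0) else none).sum

theorem foldl_gcd_eq_specGcd (t : List Int) (h : Int) :
    t.foldl (fun a b => ((Int.gcd a b : Nat) : Int)) h = specGcd (h :: t) := by
  induction t generalizing h with
  | nil => rfl
  | cons b t' ih =>
    rw [List.foldl_cons, ih,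
      show ((Int.gcd h b : Nat) : Int) = igcd h b from (igcd_eq_gcd h b).symm]
    cases t' with
    | nil => rfl
    | cons c t'' =>
      show igcd (igcd h b) (specGcd (c :: t'')) = igcd h (specGcd (b :: c :: t''))
      rw [igcd_assoc]
      rfl

theorem pyReduceGcd_eq_specGcd (l : List Int) : pyReduceGcd l = specGcd l := by
  cases l with
  | nil => rfl
  | cons h t => exact foldl_gcd_eq_specGcd t h

theorem portA_fold_eq (distance cost : List Int) :
    coverThemAll distance cost =
      (let T := cost.sum
       let F := (List.range (2 ^ distance.length)).foldl
         (fun mc m => if specGcd (bitsSelect distance m) = 1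
                      then min mc (costSumBits cost distance.length m) else mc) T
       if F ≠ T then F else -1) := by
  simp only [coverThemAll]
  have hM : ((2 : Int) ^ distance.length) = ((2 ^ distance.length : Nat) : Int) := by
    push_cast; ring
  rw [hM]
  have hb0 : ∀ b : Int, PySem.Int.band 0 b = 0 := by
    intro b; rw [PySem.Int.band_comm]; exact PySem.Int.band_zero b
  have hcons : PySem.List.pyRange 0 ((2 ^ distance.length : Nat) : Int)
      = 0 :: PySem.List.pyRange 1 ((2 ^ distance.length : Nat) : Int) :=
    PySem.List.pyRange_one_cons (by exact_mod_cast Nat.two_pow_pos distance.length)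
  have hrange : ∀ g : Int → Int → Int, (∀ mc, g mc 0 = mc) →
      (PySem.List.pyRange 1 ((2 ^ distance.length : Nat) : Int)).foldl g cost.sum
        = (List.range (2 ^ distance.length)).foldl (fun mc m => g mc ((m : Nat) : Int)) cost.sum := by
    intro g hg0
    have : (PySem.List.pyRange 0 ((2 ^ distance.length : Nat) : Int)).foldl g cost.sum
        = (PySem.List.pyRange 1 ((2 ^ distance.length : Nat) : Int)).foldl g cost.sum := by
      rw [hcons, List.foldl_cons, hg0]
    rw [← this, PySem.List.pyRange_zero_natCast, List.foldl_map]
  rw [hrange _ (by intro mc; simp [hb0, pyReduceGcd])]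
  have hcongr := PySem.List.foldl_congr_mem (List.range (2 ^ distance.length))
    (fun (mc : Int) (m : Nat) =>
      if pyReduceGcd ((List.range distance.length).filterMap (fun (j : Nat) =>
          if PySem.Int.band ((m : Nat) : Int) ((1 : Int) <<< j) ≠ 0
          then some (PySem.List.pyGetD distance (j : Int) 0) else none)) = 1
      then min mc ((List.range distance.length).foldl (fun (s : Int) (j : Nat) =>
          if PySem.Int.band ((m : Nat) : Int) ((1 : Int) <<< j) ≠ 0
          then s + PySem.List.pyGetD cost (j : Int) 0 else s) 0)
      else mc)
    (fun mc m => if specGcd (bitsSelect distance m) = 1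
                 then min mc (costSumBits cost distance.length m) else mc) cost.sum ?_
  · rw [hcongr]
  · intro mc m hm
    have hsel : (List.range distance.length).filterMap (fun (j : Nat) =>
          if PySem.Int.band ((m : Nat) : Int) ((1 : Int) <<< j) ≠ 0
          then some (PySem.List.pyGetD distance (j : Int) 0) else none)
        = bitsSelect distance m := by
      rw [← fm_bits distance m]
      apply List.filterMap_congr
      intro j hj
      simp only [PySem.List.pyGetD_natCast]
      by_cases ht : m.testBit j = true
      · rw [if_pos ht, if_pos ((band_test m j).mpr ht)]
      · rw [if_neg ht, if_neg (fun hb => ht ((band_test m j).mp hb))]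
    have hcur : (List.range distance.length).foldl (fun (s : Int) (j : Nat) =>
          if PySem.Int.band ((m : Nat) : Int) ((1 : Int) <<< j) ≠ 0
          then s + PySem.List.pyGetD cost (j : Int) 0 else s) 0
        = costSumBits cost distance.length m := by
      rw [foldl_addif (List.range distance.length)
        (fun (j : Nat) => PySem.Int.band ((m : Nat) : Int) ((1 : Int) <<< j) ≠ 0)
        (fun (j : Nat) => PySem.List.pyGetD cost (j : Int) 0) 0, zero_add]
      unfold costSumBits
      apply congrArg
      apply List.filterMap_congr
      intro j hj
      simp only [PySem.List.pyGetD_natCast]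
      by_cases ht : m.testBit j = true
      · rw [if_pos ht, if_pos ((band_test m j).mpr ht)]
      · rw [if_neg ht, if_neg (fun hb => ht ((band_test m j).mp hb))]
    simp only [hsel, hcur, pyReduceGcd_eq_specGcd]

theorem map_snd_zip_of_le {d c : List Int} (h : d.length ≤ c.length) :
    (d.zip c).map Prod.snd = c.take d.length := by
  induction d generalizing c with
  | nil => simp
  | cons a d ih =>
    cases c with
    | nil => simp at h
    | cons b c =>
      simp only [List.zip_cons_cons, List.map_cons, List.length_cons, List.take_succ_cons]
      rw [ih (by simpa using h)]

theorem portA_char {distance cost : List Int} (h : distance.length ≤ cost.length) :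
    coverThemAll distance cost =
      (if (qualCosts (distance.zip cost)).foldl min cost.sum ≠ cost.sum
       then (qualCosts (distance.zip cost)).foldl min cost.sum else -1) := by
  rw [portA_fold_eq]
  have hlen : (distance.zip cost).length = distance.length := by
    rw [List.length_zip]; omega
  have htake : (cost.take distance.length).length = distance.length := by
    rw [List.length_take]; omega
  have hfold : (List.range (2 ^ distance.length)).foldl
        (fun mc m => if specGcd (bitsSelect distance m) = 1
                     then min mc (costSumBits cost distance.length m) else mc) cost.sum
      = (qualCosts (distance.zip cost)).foldl min cost.sum := by
    have hstep : ∀ (mc : Int) (m : Nat),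
        (if specGcd (bitsSelect distance m) = 1
         then min mc (costSumBits cost distance.length m) else mc)
          = (if specGcd ((bitsSelect (distance.zip cost) m).map Prod.fst) = 1
             then min mc (specCost (bitsSelect (distance.zip cost) m)) else mc) := by
      intro mc m
      have hsel : bitsSelect distance m = (bitsSelect (distance.zip cost) m).map Prod.fst := by
        rw [← bitsSelect_map, List.map_fst_zip h]
      have hcost : costSumBits cost distance.length m
          = specCost (bitsSelect (distance.zip cost) m) := by
        unfold costSumBits specCost
        rw [← bitsSelect_map, map_snd_zip_of_le h,
          ← fm_bits (cost.take distance.length) m, htake]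
        apply congrArg
        apply List.filterMap_congr
        intro j hj
        have hjlt : j < distance.length := List.mem_range.mp hj
        have : (cost.take distance.length).getD j 0 = cost.getD j 0 := by
          rw [List.getD_eq_getElem?_getD, List.getD_eq_getElem?_getD, List.getElem?_take,
            if_pos hjlt]
        rw [this]
      rw [hsel, hcost]
    have h1 : (List.range (2 ^ distance.length)).foldl
          (fun mc m => if specGcd (bitsSelect distance m) = 1
                       then min mc (costSumBits cost distance.length m) else mc) cost.sum
        = (List.range (2 ^ (distance.zip cost).length)).foldl
            (fun (mc : Int) m => if specGcd ((bitsSelect (distance.zip cost) m).map Prod.fst) = 1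
                 then min mc (specCost (bitsSelect (distance.zip cost) m)) else mc) cost.sum := by
      rw [hlen]
      exact PySem.List.foldl_congr_mem _ _ _ _ (fun mc m _ => hstep mc m)
    rw [h1, ← List.foldl_map (f := bitsSelect (distance.zip cost))
        (g := fun (mc : Int) s => if specGcd (s.map Prod.fst) = 1
              then min mc (specCost s) else mc),
      map_bits_range, foldl_ifmin]
    rfl
  simp only [hfold]

-- ---------- characterisation of port B (DP invariant) ----------
def Achieves (l : List (Int × Int)) (g v : Int) : Prop :=
  ∃ s ∈ l.sublists, s ≠ [] ∧ specGcd (s.map Prod.fst) = g ∧ specCost s = v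

def DPInv (l : List (Int × Int)) (dp : PySem.Dict Int Int) : Prop :=
  dp.keys.Nodup ∧
  (∀ g v, dp.get? g = some v → Achieves l g v ∧ ∀ w, Achieves l g w → v ≤ w) ∧
  (∀ g, dp.get? g = none → ∀ v, ¬ Achieves l g v)

def ominF (o : Option Int) (w : Int) : Option Int :=
  some (match o with | none => w | some cur => min w cur)

theorem altRelax_get? (nw : PySem.Dict Int Int) (a w k : Int) :
    (altRelax nw a w).get? k = if k = a then ominF (nw.get? k) w else nw.get? k := by
  unfold altRelax
  by_cases hk : k = a
  · subst hk
    cases h : nw.get? k with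
    | none => simp [h, PySem.Dict.get?_insert, ominF]
    | some cur =>
      by_cases hlt : w < cur
      · simp [h, hlt, PySem.Dict.get?_insert, ominF, min_def, le_of_lt hlt]
      · have : min w cur = cur := by omega
        simp [h, hlt, ominF, this]
  · cases h : nw.get? a with
    | none => simp [h, PySem.Dict.get?_insert, hk]
    | some cur =>
      by_cases hlt : w < cur <;> simp [h, hlt, PySem.Dict.get?_insert, hk]

theorem altRelax_nodup (nw : PySem.Dict Int Int) (a w : Int) (h : nw.keys.Nodup) :
    (altRelax nw a w).keys.Nodup := by
  unfold altRelax
  cases hg : nw.get? a with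
  | none => exact PySem.Dict.nodup_keys_insert _ _ _ h
  | some cur =>
    by_cases hlt : w < cur
    · simpa [hlt] using PySem.Dict.nodup_keys_insert nw a w h
    · simpa [hlt] using h

theorem relax_fold_get? (d c : Int) (L : List (Int × Int)) (nw : PySem.Dict Int Int) (k : Int) :
    (L.foldl (fun nw gv => altRelax nw (altGcd gv.1 d) (gv.2 + c)) nw).get? k
      = (L.filterMap fun gv => if altGcd gv.1 d = k then some (gv.2 + c) else none).foldl
          ominF (nw.get? k) := by
  induction L generalizing nw with
  | nil => rfl
  | cons gv L ih =>
    rw [List.foldl_cons, List.filterMap_cons, ih]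
    by_cases hk : altGcd gv.1 d = k
    · rw [if_pos hk, List.foldl_cons, altRelax_get?, if_pos hk.symm]
    · rw [if_neg hk, altRelax_get?, if_neg (fun h => hk h.symm)]

theorem relax_fold_nodup (d c : Int) (L : List (Int × Int)) (nw : PySem.Dict Int Int)
    (h : nw.keys.Nodup) :
    (L.foldl (fun nw gv => altRelax nw (altGcd gv.1 d) (gv.2 + c)) nw).keys.Nodup := by
  induction L generalizing nw with
  | nil => exact h
  | cons gv L ih => exact ih _ (altRelax_nodup _ _ _ h)

theorem ominF_foldl_none {C : List Int} {o : Option Int} (h : C.foldl ominF o = none) :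
    o = none ∧ C = [] := by
  induction C generalizing o with
  | nil => exact ⟨h, rfl⟩
  | cons w C ih =>
    rw [List.foldl_cons] at h
    exact absurd (ih h).1 (by simp [ominF])

theorem ominF_foldl_some {C : List Int} {o : Option Int} {v : Int}
    (h : C.foldl ominF o = some v) :
    (v ∈ C ∨ o = some v) ∧ (∀ w ∈ C, v ≤ w) ∧ (∀ u, o = some u → v ≤ u) := by
  induction C generalizing o with
  | nil =>
    refine ⟨Or.inr h, by simp, fun u hu => ?_⟩
    rw [hu] at h
    simp only [List.foldl_nil, Option.some.injEq] at h
    omega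
  | cons w C ih =>
    rw [List.foldl_cons] at h
    obtain ⟨h1, h2, h3⟩ := ih h
    cases o with
    | none =>
      have hm : ominF none w = some w := rfl
      refine ⟨?_, ?_, by simp⟩
      · rcases h1 with hv | hv
        · exact Or.inl (by simp [hv])
        · rw [hm] at hv
          exact Or.inl (by simp [Option.some.injEq] at hv; simp [hv])
      · intro x hx
        rcases List.mem_cons.mp hx with rfl | hx'
        · exact h3 _ hm
        · exact h2 _ hx'
    | some cur =>
      have hm : ominF (some cur) w = some (min w cur) := rfl
      refine ⟨?_, ?_, ?_⟩
      · rcases h1 with hv | hv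
        · exact Or.inl (by simp [hv])
        · rw [hm, Option.some.injEq] at hv
          rcases min_cases w cur with ⟨he, -⟩ | ⟨he, -⟩
          · exact Or.inl (by simp [← hv, he])
          · exact Or.inr (by rw [← hv, he])
      · intro x hx
        rcases List.mem_cons.mp hx with rfl | hx'
        · exact le_trans (h3 _ hm) (min_le_left _ _)
        · exact h2 _ hx'
      · rintro u rfl0
        have := h3 _ hm
        have h4 : min w cur ≤ u := by
          cases rfl0
          exact min_le_right _ _
        exact le_trans this h4

theorem specGcd_concat {ys : List Int} (hne : ys ≠ []) (a : Int) :
    specGcd (ys ++ [a]) = igcd (specGcd ys) a := by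
  induction ys with
  | nil => exact absurd rfl hne
  | cons y t ih =>
    cases t with
    | nil => rfl
    | cons y2 t' =>
      show specGcd (y :: (y2 :: t' ++ [a])) = _
      have h1 : specGcd (y :: (y2 :: t' ++ [a])) = igcd y (specGcd (y2 :: t' ++ [a])) := by
        cases t' <;> rfl
      rw [h1, ih (by simp), ← igcd_assoc]
      rfl

theorem specCost_concat (s : List (Int × Int)) (x : Int × Int) :
    specCost (s ++ [x]) = specCost s + x.2 := by
  simp [specCost]

theorem specGcd_singleton (a : Int) : specGcd [a] = a := rfl

theorem specCost_singleton (x : Int × Int) : specCost [x] = x.2 := by simp [specCost]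

theorem ach_append (p : List (Int × Int)) (x : Int × Int) (g v : Int) :
    Achieves (p ++ [x]) g v ↔
      Achieves p g v ∨ (∃ h w, Achieves p h w ∧ igcd h x.1 = g ∧ v = w + x.2) ∨
        (g = x.1 ∧ v = x.2) := by
  constructor
  · rintro ⟨s, hs, hne, hg, hc⟩
    rw [List.sublists_concat, List.mem_append] at hs
    rcases hs with hs | hs
    · exact Or.inl ⟨s, hs, hne, hg, hc⟩
    · rw [List.mem_map] at hs
      obtain ⟨t, ht, rfl⟩ := hs
      cases t with
      | nil =>
        refine Or.inr (Or.inr ⟨?_, ?_⟩)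
        · rw [← hg]; simp [specGcd_singleton]
        · rw [← hc]; simp [specCost_singleton]
      | cons y t' =>
        refine Or.inr (Or.inl ⟨specGcd ((y :: t').map Prod.fst), specCost (y :: t'),
          ⟨y :: t', ht, by simp, rfl, rfl⟩, ?_, ?_⟩)
        · rw [← hg]
          simp only [List.map_append, List.map_cons, List.map_nil]
          rw [specGcd_concat (by simp)]
        · rw [← hc, specCost_concat]
  · rintro (⟨s, hs, hne, hg, hc⟩ | ⟨h, w, ⟨t, ht, htne, hgt, hct⟩, hgx, hv⟩ | ⟨rfl, rfl⟩)
    · refine ⟨s, ?_, hne, hg, hc⟩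
      rw [List.sublists_concat, List.mem_append]
      exact Or.inl hs
    · refine ⟨t ++ [x], ?_, by simp, ?_, ?_⟩
      · rw [List.sublists_concat, List.mem_append]
        exact Or.inr (List.mem_map_of_mem ht)
      · simp only [List.map_append, List.map_cons, List.map_nil]
        rw [specGcd_concat (by simpa using htne), hgt, hgx]
      · rw [specCost_concat, hct, hv]
    · refine ⟨[x], ?_, by simp, by simp [specGcd_singleton], by simp [specCost_singleton]⟩
      rw [List.sublists_concat, List.mem_append]
      exact Or.inr (List.mem_map_of_mem (List.mem_sublists.mpr (List.nil_sublist p)))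

theorem altGcd_eq_igcd (a b : Int) : altGcd a b = igcd a b :=
  (igcd_eq_gcd a b).symm ▸ rfl

theorem altStep_eq (dp : PySem.Dict Int Int) (x : Int × Int) :
    altStep dp x
      = altRelax (dp.items.foldl (fun nw gv => altRelax nw (altGcd gv.1 x.1) (gv.2 + x.2)) dp)
          x.1 x.2 := rfl

set_option maxHeartbeats 1000000 in
theorem dp_inv (l : List (Int × Int)) : DPInv l (l.foldl altStep PySem.Dict.empty) := by
  induction l using List.reverseRecOn with
  | nil =>
    rw [List.foldl_nil]
    refine ⟨PySem.Dict.nodup_keys_empty, ?_, ?_⟩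
    · intro g v h
      rw [PySem.Dict.get?_empty] at h
      cases h
    · rintro g - v ⟨s, hs, hne, -, -⟩
      rw [List.sublists_nil, List.mem_singleton] at hs
      exact hne hs
  | append_singleton p x ih =>
    rw [List.foldl_append, List.foldl_cons, List.foldl_nil]
    obtain ⟨hnd, hsome, hnone⟩ := ih
    rw [altStep_eq]
    set dp := p.foldl altStep PySem.Dict.empty with hdp
    set nw := dp.items.foldl (fun nw gv => altRelax nw (altGcd gv.1 x.1) (gv.2 + x.2)) dp with hnwdef
    set C : Int → List Int :=
      fun k => dp.items.filterMap (fun gv => if altGcd gv.1 x.1 = k then some (gv.2 + x.2) else none)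
      with hCdef
    have hnwget : ∀ k, nw.get? k = (C k).foldl ominF (dp.get? k) :=
      fun k => relax_fold_get? x.1 x.2 dp.items dp k
    have hnwnd : nw.keys.Nodup := relax_fold_nodup _ _ _ _ hnd
    have hget : ∀ k, (altRelax nw x.1 x.2).get? k
        = if k = x.1 then ominF (nw.get? k) x.2 else nw.get? k :=
      fun k => altRelax_get? nw x.1 x.2 k
    have hCmem : ∀ k w', w' ∈ C k ↔ ∃ a b, dp.get? a = some b ∧ igcd a x.1 = k ∧ w' = b + x.2 := by
      intro k w'
      rw [hCdef]
      simp only [List.mem_filterMap]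
      constructor
      · rintro ⟨⟨a, b⟩, hab, hif⟩
        by_cases hk : altGcd a x.1 = k
        · rw [if_pos hk, Option.some.injEq] at hif
          exact ⟨a, b, PySem.Dict.get?_of_mem_items dp hab hnd, hk, hif.symm⟩
        · rw [if_neg hk] at hif
          cases hif
      · rintro ⟨a, b, hab, hk, rfl⟩
        exact ⟨(a, b), PySem.Dict.mem_items_of_get?_eq_some dp hab, by simp [altGcd_eq_igcd, hk]⟩
    -- achieved-ness of candidate values
    have achDp : ∀ k v', dp.get? k = some v' → Achieves (p ++ [x]) k v' := by
      intro k v' h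
      exact (ach_append p x k v').mpr (Or.inl (hsome k v' h).1)
    have achC : ∀ k v', v' ∈ C k → Achieves (p ++ [x]) k v' := by
      intro k v' h
      obtain ⟨a, b, hab, hk, rfl⟩ := (hCmem k v').mp h
      exact (ach_append p x k (b + x.2)).mpr (Or.inr (Or.inl ⟨a, b, (hsome a b hab).1, hk, rfl⟩))
    -- lower-bound transfer: any value achieved by the new list dominates some candidate
    have lb : ∀ k v', (∀ w ∈ C k, v' ≤ w) → (∀ u, dp.get? k = some u → v' ≤ u) →
        (k = x.1 → v' ≤ x.2) → ∀ w, Achieves (p ++ [x]) k w → v' ≤ w := by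
      intro k v' hCb hub hx1 w hw
      rcases (ach_append p x k w).mp hw with hw | ⟨a, w0, ha, hk, rfl⟩ | ⟨rfl, rfl⟩
      · cases hu : dp.get? k with
        | none => exact absurd hw (hnone k hu w)
        | some u => exact le_trans (hub u hu) ((hsome k u hu).2 w hw)
      · cases hb : dp.get? a with
        | none => exact absurd ha (hnone a hb w0)
        | some b =>
          have hmem : b + x.2 ∈ C k := (hCmem k (b + x.2)).mpr ⟨a, b, hb, hk, rfl⟩
          have : b ≤ w0 := (hsome a b hb).2 w0 ha
          exact le_trans (hCb _ hmem) (by omega)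
      · exact hx1 rfl
    refine ⟨altRelax_nodup _ _ _ hnwnd, ?_, ?_⟩
    · intro g v hg
      rw [hget] at hg
      by_cases hgx : g = x.1
      · rw [if_pos hgx] at hg
        cases hnwg : nw.get? g with
        | none =>
          obtain ⟨hdpg, hCg⟩ := ominF_foldl_none ((hnwget g).symm.trans hnwg)
          rw [hnwg] at hg
          have hv : v = x.2 := by
            simp [ominF] at hg
            omega
          subst hv
          refine ⟨(ach_append p x g x.2).mpr (Or.inr (Or.inr ⟨hgx, rfl⟩)), ?_⟩
          exact lb g x.2 (fun w hw => by rw [hCg] at hw; cases hw)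
            (fun u hu => by rw [hdpg] at hu; cases hu) (fun _ => le_refl _)
        | some m =>
          obtain ⟨hm1, hm2, hm3⟩ := ominF_foldl_some ((hnwget g).symm.trans hnwg)
          rw [hnwg] at hg
          have hv : v = min x.2 m := by
            simp [ominF] at hg
            omega
          subst hv
          constructor
          · rcases min_cases x.2 m with ⟨he, -⟩ | ⟨he, -⟩
            · rw [he]
              exact (ach_append p x g x.2).mpr (Or.inr (Or.inr ⟨hgx, rfl⟩))
            · rw [he]
              rcases hm1 with hm | hm
              · exact achC g m hm
              · exact achDp g m hm
          · exact lb g _ (fun w hw => le_trans (min_le_right _ _) (hm2 w hw))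
              (fun u hu => le_trans (min_le_right _ _) (hm3 u hu))
              (fun _ => min_le_left _ _)
      · rw [if_neg hgx] at hg
        obtain ⟨hm1, hm2, hm3⟩ := ominF_foldl_some ((hnwget g).symm.trans hg)
        constructor
        · rcases hm1 with hm | hm
          · exact achC g v hm
          · exact achDp g v hm
        · exact lb g v hm2 hm3 (fun h => absurd h hgx)
    · intro g hg v
      rw [hget] at hg
      by_cases hgx : g = x.1
      · rw [if_pos hgx] at hg
        simp [ominF] at hg
      · rw [if_neg hgx] at hg
        obtain ⟨hdpg, hCg⟩ := ominF_foldl_none ((hnwget g).symm.trans hg)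
        intro hach
        rcases (ach_append p x g v).mp hach with hw | ⟨a, w0, ha, hk, rfl⟩ | ⟨h1, -⟩
        · exact hnone g hdpg v hw
        · cases hb : dp.get? a with
          | none => exact hnone a hb w0 ha
          | some b =>
            have hmem : b + x.2 ∈ C g := (hCmem g (b + x.2)).mpr ⟨a, b, hb, hk, rfl⟩
            rw [hCg] at hmem
            cases hmem
        · exact hgx h1

theorem mem_qualCosts {l : List (Int × Int)} {v : Int} :
    v ∈ qualCosts l ↔ Achieves l 1 v := by
  unfold qualCosts Achieves
  rw [List.mem_filterMap]
  constructor
  · rintro ⟨s, hs, hsv⟩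
    by_cases hg : specGcd (s.map Prod.fst) = 1
    · rw [if_pos hg] at hsv
      refine ⟨s, hs, ?_, hg, by simpa using hsv⟩
      rintro rfl
      simp [specGcd] at hg
    · rw [if_neg hg] at hsv; cases hsv
  · rintro ⟨s, hs, -, hg, hc⟩
    exact ⟨s, hs, by rw [if_pos hg, hc]⟩

theorem map_fst_zip_sublist (d c : List Int) : ((d.zip c).map Prod.fst).Sublist d := by
  induction d generalizing c with
  | nil => simp
  | cons a d ih =>
    cases c with
    | nil => simp
    | cons b c =>
      simpa using List.Sublist.cons₂ a (ih c)

-- a qualifying subset of the zipped items yields one of distance itself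
theorem qual_of_achieves {distance cost : List Int} {v : Int}
    (h : Achieves (distance.zip cost) 1 v) :
    listGcd distance = 1 ∧ (2 ≤ distance.length ∨ distance = [1]) := by
  obtain ⟨s, hs, hne, hg, -⟩ := h
  have h1 : (s.map Prod.fst).Sublist distance :=
    ((List.mem_sublists.mp hs).map Prod.fst).trans (map_fst_zip_sublist distance cost)
  exact qual_imp (List.mem_sublists.mpr h1) (by simpa using hne) hg

-- the two ports coincide when cost is at least as long as distance
theorem main_case {distance cost : List Int} (hlen : distance.length ≤ cost.length) :
    coverThemAll distance cost = coverThemAll_alt distance cost := by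
  obtain ⟨hnd, hsome, hnone⟩ := dp_inv (distance.zip cost)
  cases hdp : ((distance.zip cost).foldl altStep PySem.Dict.empty).get? 1 with
  | none =>
    have hS : qualCosts (distance.zip cost) = [] := by
      cases hq : qualCosts (distance.zip cost) with
      | nil => rfl
      | cons a S' =>
        have ha : Achieves (distance.zip cost) 1 a := mem_qualCosts.mp (by rw [hq]; simp)
        exact absurd ha (hnone 1 hdp a)
    rw [portA_char hlen, hS]
    simp only [coverThemAll_alt, hdp]
    simp
  | some v =>
    obtain ⟨hach, hmin⟩ := hsome 1 v hdp
    rw [portA_char hlen,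
      fm_eq cost.sum (mem_qualCosts.mpr hach) (fun w hw => hmin w (mem_qualCosts.mp hw))]
    simp only [coverThemAll_alt, hdp]

-- in the no-qualifying-subset case both ports return -1 (cost may be shorter here)
theorem noqual_case {distance cost : List Int}
    (hnoq : ¬ (listGcd distance = 1 ∧ (2 ≤ distance.length ∨ distance = [1]))) :
    coverThemAll distance cost = -1 ∧ coverThemAll_alt distance cost = -1 := by
  constructor
  · rw [portA_fold_eq]
    have hfold : (List.range (2 ^ distance.length)).foldl
          (fun mc m => if specGcd (bitsSelect distance m) = 1
                       then min mc (costSumBits cost distance.length m) else mc) cost.sum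
        = cost.sum := by
      rw [PySem.List.foldl_congr_mem _ _ (fun (mc : Int) (m : Nat) => mc) _ ?_]
      · exact PySem.List.foldl_ignore _ _
      · intro mc m hm
        rw [if_neg]
        intro h1
        have hmem : bitsSelect distance m ∈ distance.sublists :=
          bitsSelect_mem_sublists distance (List.mem_range.mp hm)
        have hne : bitsSelect distance m ≠ [] := by
          intro h0
          rw [h0] at h1
          simp [specGcd] at h1
        exact hnoq (qual_imp hmem hne h1)
    simp only [hfold]
    simp
  · obtain ⟨hnd, hsome, hnone⟩ := dp_inv (distance.zip cost)
    cases hdp : ((distance.zip cost).foldl altStep PySem.Dict.empty).get? 1 with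
    | none => simp only [coverThemAll_alt, hdp]; simp
    | some v =>
      obtain ⟨hach, -⟩ := hsome 1 v hdp
      exact absurd (qual_of_achieves hach) hnoq

-- ===== VERDICT (by name: the statement is the Claim_ definition above) =====
theorem coverThemAll_spec : Claim_equal_coverThemAll := by
  intro distance cost hDom hPre
  show coverThemAll distance cost = coverThemAll_alt distance cost
  by_cases hlen : distance.length ≤ cost.length
  · exact main_case hlen
  · rcases hPre with hlen' | hnoq
    · exact absurd hlen' hlen
    · obtain ⟨hA, hB⟩ := noqual_case (cost := cost) hnoq
      rw [hA, hB]
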